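-- pv_equiv track=rewrite | github.com/thinlines/timetable | timetable.py | teacher_consecutive_assignment_ok
-- ===== SOURCE A (Python) =====
-- PERIODS = list(range(1, 10))  # 9 periods per day
--
-- def teacher_consecutive_assignment_ok(
--     teacher, course, day, period, timetables, consecutive_limits
-- ):
--     # Check if assigning at this period would cause too many consecutive lessons of the same course.
--     limit = consecutive_limits.get(course)
--     if limit is None:
--         return True
--     # Collect all periods in the given day where the teacher is assigned to this course.
--     assigned_periods = []
--     for p in PERIODS:
--         for schedule in timetables.values():
--             entry = schedule.get((day, p))
--             if (
--                 entry is not None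
--                 and entry.get("teacher") == teacher
--                 and entry.get("course") == course
--             ):
--                 assigned_periods.append(p)
--                 break  # found an assignment for this period; no need to check further
--     # Simulate adding the current period.
--     if period not in assigned_periods:
--         assigned_periods.append(period)
--     assigned_periods.sort()
--     # Count the maximum number of consecutive periods.
--     max_streak = 1
--     current_streak = 1
--     for i in range(1, len(assigned_periods)):
--         if assigned_periods[i] == assigned_periods[i - 1] + 1:
--             current_streak += 1
--             max_streak = max(max_streak, current_streak)
--         else:
--             current_streak = 1
--     return max_streak <= limit
-- ===== SOURCE B (Python) =====
-- def teacher_consecutive_assignment_ok(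
--     teacher, course, day, period, timetables, consecutive_limits
-- ):
--     limit = consecutive_limits.get(course)
--     if limit is None:
--         return True
--     # One pass over all schedule entries: collect matching periods (plus the candidate).
--     assigned = {period}
--     for schedule in timetables.values():
--         for (d, p), entry in schedule.items():
--             if (
--                 d == day
--                 and 1 <= p <= 9
--                 and entry.get("teacher") == teacher
--                 and entry.get("course") == course
--             ):
--                 assigned.add(p)
--     # OK iff no window of limit+1 consecutive periods lies entirely in the set.
--     return not any(
--         all(s + i in assigned for i in range(limit + 1)) for s in assigned
--     )
-- ===== Notes on version B (the rewrite author's own statement) =====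
-- stated objective: simpler
-- what changed: B replaces A's period-by-period rescans of every schedule plus sort-and-adjacent-streak counting with one pass over all schedule entries building a set and a direct 'no window of limit+1 consecutive members' check; Pre_ only excludes association lists in which one schedule dict carries a duplicate (day,period) key, which cannot arise from a real Python dict and makes first-match lookup and full-iteration diverge.
import Mathlib
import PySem

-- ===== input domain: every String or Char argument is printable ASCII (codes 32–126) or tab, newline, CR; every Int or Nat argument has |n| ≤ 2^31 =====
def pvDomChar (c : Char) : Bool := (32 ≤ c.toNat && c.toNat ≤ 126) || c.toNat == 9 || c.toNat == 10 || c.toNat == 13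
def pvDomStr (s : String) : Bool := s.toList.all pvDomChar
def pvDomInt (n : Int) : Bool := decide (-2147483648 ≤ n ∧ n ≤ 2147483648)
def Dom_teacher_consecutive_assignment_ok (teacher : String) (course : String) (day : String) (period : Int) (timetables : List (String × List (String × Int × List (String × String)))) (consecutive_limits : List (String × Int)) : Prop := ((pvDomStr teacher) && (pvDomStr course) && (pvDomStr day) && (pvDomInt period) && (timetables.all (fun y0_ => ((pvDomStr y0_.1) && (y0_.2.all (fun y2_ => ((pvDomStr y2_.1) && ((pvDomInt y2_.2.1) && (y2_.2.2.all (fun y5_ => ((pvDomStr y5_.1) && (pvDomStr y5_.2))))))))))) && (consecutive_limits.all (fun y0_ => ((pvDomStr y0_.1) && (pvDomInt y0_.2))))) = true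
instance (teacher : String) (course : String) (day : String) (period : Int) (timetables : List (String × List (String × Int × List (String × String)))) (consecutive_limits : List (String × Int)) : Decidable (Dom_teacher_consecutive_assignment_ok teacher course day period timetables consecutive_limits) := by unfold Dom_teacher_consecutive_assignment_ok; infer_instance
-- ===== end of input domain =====

-- B replaces A's per-period rescans + sort + adjacent-streak scan by one pass collecting a set
-- of assigned periods and a direct "no limit+1 consecutive members" window check (objective: simpler).

-- ===== PORT A =====
-- shared: dict.get on an association list (first match), exact per the dict convention
def pvEntryOk (teacher course : String) (e : List (String × String)) : Bool :=
  ((PySem.Dict.mk e).get? "teacher" == some teacher) && ((PySem.Dict.mk e).get? "course" == some course)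

-- schedule.get((day, p)): first-match lookup with the tuple key, exact for assoc lists
def pvA_schedGet (day : String) (p : Int) : List (String × Int × List (String × String)) → Option (List (String × String))
  | [] => none
  | y :: rest => if y.1 == day && y.2.1 == p then some y.2.2 else pvA_schedGet day p rest

-- the inner 'for schedule in timetables.values(): … break' = first schedule with a matching entry
def pvA_hit (teacher course day : String) (p : Int) (timetables : List (String × List (String × Int × List (String × String)))) : Bool :=
  timetables.any (fun t =>
    match pvA_schedGet day p t.2 with
    | some e => pvEntryOk teacher course e
    | none => false)

-- the streak loop; state = (max_streak, current_streak), prev = assigned_periods[i-1]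
def pvA_streakLoop (prev : Int) (st : Int × Int) : List Int → Int × Int
  | [] => st
  | x :: xs =>
    if x = prev + 1 then pvA_streakLoop x (max st.1 (st.2 + 1), st.2 + 1) xs
    else pvA_streakLoop x (st.1, 1) xs

def teacher_consecutive_assignment_ok (teacher : String) (course : String) (day : String) (period : Int) (timetables : List (String × List (String × Int × List (String × String)))) (consecutive_limits : List (String × Int)) : Bool :=
  match (PySem.Dict.mk consecutive_limits).get? course with
  | none => true
  | some limit =>
    let assigned := (PySem.List.pyRange 1 10 1).foldl
      (fun acc p => if pvA_hit teacher course day p timetables then acc ++ [p] else acc) []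
    let assigned2 := if assigned.contains period then assigned else assigned ++ [period]
    let sortedL := PySem.List.sorted assigned2 (fun x => x) false
    let maxStreak : Int :=
      match sortedL with
      | [] => 1
      | h :: t => (pvA_streakLoop h (1, 1) t).1
    decide (maxStreak ≤ limit)

-- ===== PORT B =====
-- one pass over every schedule item, collecting matching periods into a set
def pvB_collect (teacher course day : String) (timetables : List (String × List (String × Int × List (String × String)))) (s0 : PySem.Set Int) : PySem.Set Int :=
  timetables.foldl (fun s t =>
    t.2.foldl (fun s y =>
      if y.1 == day && (decide (1 ≤ y.2.1) && decide (y.2.1 ≤ 9)) && pvEntryOk teacher course y.2.2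
      then PySem.Set.add s y.2.1 else s) s) s0

def teacher_consecutive_assignment_ok_alt (teacher : String) (course : String) (day : String) (period : Int) (timetables : List (String × List (String × Int × List (String × String)))) (consecutive_limits : List (String × Int)) : Bool :=
  match (PySem.Dict.mk consecutive_limits).get? course with
  | none => true
  | some limit =>
    let assigned := pvB_collect teacher course day timetables (PySem.Set.add PySem.Set.empty period)
    !(assigned.any (fun s =>
        (PySem.List.pyRange 0 (limit + 1) 1).all (fun i => PySem.Set.contains assigned (s + i))))

-- ===== PRECONDITION & SPEC =====
-- Pre_ excludes only association lists in which some schedule dict has a duplicate (day, period)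
-- key: such inputs cannot arise from a Python dict, and on them A's first-match lookup and B's
-- full iteration over the items may legitimately diverge.
def Pre_teacher_consecutive_assignment_ok (teacher : String) (course : String) (day : String) (period : Int) (timetables : List (String × List (String × Int × List (String × String)))) (consecutive_limits : List (String × Int)) : Prop :=
  ∀ t ∈ timetables, (t.2.map (fun y => (y.1, y.2.1))).Nodup
instance (teacher : String) (course : String) (day : String) (period : Int) (timetables : List (String × List (String × Int × List (String × String)))) (consecutive_limits : List (String × Int)) : Decidable (Pre_teacher_consecutive_assignment_ok teacher course day period timetables consecutive_limits) := by unfold Pre_teacher_consecutive_assignment_ok; infer_instance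

def pvWitness_teacher_consecutive_assignment_ok : String × String × String × Int × (List (String × List (String × Int × List (String × String)))) × (List (String × Int)) :=
  ("t", "c", "mon", 3, [("tt", [("mon", 3, [("teacher", "t"), ("course", "c")])])], [("c", 2)])

def Spec_teacher_consecutive_assignment_ok (teacher : String) (course : String) (day : String) (period : Int) (timetables : List (String × List (String × Int × List (String × String)))) (consecutive_limits : List (String × Int)) (out : Bool) : Prop := out = teacher_consecutive_assignment_ok_alt teacher course day period timetables consecutive_limits
instance (teacher : String) (course : String) (day : String) (period : Int) (timetables : List (String × List (String × Int × List (String × String)))) (consecutive_limits : List (String × Int)) (out : Bool) : Decidable (Spec_teacher_consecutive_assignment_ok teacher course day period timetables consecutive_limits out) := by unfold Spec_teacher_consecutive_assignment_ok; infer_instance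

-- ===== CLAIM (what is proved, stated in full; the proofs are below) =====
def Claim_equal_teacher_consecutive_assignment_ok : Prop := ∀ (teacher : String) (course : String) (day : String) (period : Int) (timetables : List (String × List (String × Int × List (String × String)))) (consecutive_limits : List (String × Int)), Dom_teacher_consecutive_assignment_ok teacher course day period timetables consecutive_limits → Pre_teacher_consecutive_assignment_ok teacher course day period timetables consecutive_limits → Spec_teacher_consecutive_assignment_ok teacher course day period timetables consecutive_limits (teacher_consecutive_assignment_ok teacher course day period timetables consecutive_limits)

-- ===== LEMMAS AND PROOFS =====

-- membership bridge for A's first-match schedule lookup, under unique keys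
theorem pv_schedGet_iff (teacher course day : String) (p : Int)
    (sched : List (String × Int × List (String × String)))
    (hnd : (sched.map (fun y => (y.1, y.2.1))).Nodup) :
    (match pvA_schedGet day p sched with
     | some e => pvEntryOk teacher course e
     | none => false) = true ↔
    ∃ y ∈ sched, y.1 = day ∧ y.2.1 = p ∧ pvEntryOk teacher course y.2.2 = true := by
  induction sched with
  | nil => simp [pvA_schedGet]
  | cons y rest ih =>
    simp only [List.map_cons, List.nodup_cons] at hnd
    by_cases hk : y.1 == day && y.2.1 == p
    · simp only [pvA_schedGet, hk, if_pos rfl]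
      simp only [Bool.and_eq_true, beq_iff_eq] at hk
      obtain ⟨hkd, hkp⟩ := hk
      constructor
      · intro h; exact ⟨y, List.mem_cons_self, hkd, hkp, h⟩
      · rintro ⟨z, hz, hzd, hzp, hok⟩
        rcases List.mem_cons.mp hz with rfl | hz'
        · exact hok
        · exfalso
          exact hnd.1 (by
            have : (z.1, z.2.1) ∈ rest.map (fun y => (y.1, y.2.1)) :=
              List.mem_map.mpr ⟨z, hz', rfl⟩
            simpa [hzd, hzp, hkd, hkp] using this)
    · have hk' : (y.1 == day && y.2.1 == p) = false := by
        simpa using hk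
      simp only [pvA_schedGet, hk']
      rw [if_neg (by simp [hk'])]
      rw [ih hnd.2]
      constructor
      · rintro ⟨z, hz, h⟩; exact ⟨z, List.mem_cons_of_mem _ hz, h⟩
      · rintro ⟨z, hz, hzd, hzp, hok⟩
        rcases List.mem_cons.mp hz with rfl | hz'
        · exfalso; simp [hzd, hzp] at hk'
        · exact ⟨z, hz', hzd, hzp, hok⟩

theorem pv_hit_iff (teacher course day : String) (p : Int)
    (timetables : List (String × List (String × Int × List (String × String))))
    (hpre : ∀ t ∈ timetables, (t.2.map (fun y => (y.1, y.2.1))).Nodup) :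
    pvA_hit teacher course day p timetables = true ↔
    ∃ t ∈ timetables, ∃ y ∈ t.2, y.1 = day ∧ y.2.1 = p ∧ pvEntryOk teacher course y.2.2 = true := by
  unfold pvA_hit
  rw [List.any_eq_true]
  constructor
  · rintro ⟨t, ht, hm⟩
    obtain ⟨y, hy, h⟩ := (pv_schedGet_iff teacher course day p t.2 (hpre t ht)).mp hm
    exact ⟨t, ht, y, hy, h⟩
  · rintro ⟨t, ht, y, hy, h⟩
    exact ⟨t, ht, (pv_schedGet_iff teacher course day p t.2 (hpre t ht)).mpr ⟨y, hy, h⟩⟩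

-- membership through B's conditional Set.add inner fold
theorem pv_mem_foldl_add (teacher course day : String) (l : List (String × Int × List (String × String)))
    (s : PySem.Set Int) (x : Int) :
    (x ∈ l.foldl (fun s y => if y.1 == day && (decide (1 ≤ y.2.1) && decide (y.2.1 ≤ 9)) && pvEntryOk teacher course y.2.2 then PySem.Set.add s y.2.1 else s) s) ↔
    x ∈ s ∨ ∃ y ∈ l, (y.1 == day && (decide (1 ≤ y.2.1) && decide (y.2.1 ≤ 9)) && pvEntryOk teacher course y.2.2) = true ∧ x = y.2.1 := by
  induction l generalizing s with
  | nil => simp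
  | cons a l ih =>
    simp only [List.foldl_cons]
    by_cases hc : a.1 == day && (decide (1 ≤ a.2.1) && decide (a.2.1 ≤ 9)) && pvEntryOk teacher course a.2.2
    · rw [if_pos hc, ih, PySem.Set.mem_add]
      constructor
      · rintro (⟨hs | rfl⟩ | ⟨y, hy, h⟩)
        · exact Or.inl hs
        · exact Or.inr ⟨a, List.mem_cons_self, hc, rfl⟩
        · exact Or.inr ⟨y, List.mem_cons_of_mem _ hy, h⟩
      · rintro (hs | ⟨y, hy, hcy, rfl⟩)
        · exact Or.inl (Or.inl hs)
        · rcases List.mem_cons.mp hy with rfl | hy'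
          · exact Or.inl (Or.inr rfl)
          · exact Or.inr ⟨y, hy', hcy, rfl⟩
    · rw [if_neg hc, ih]
      constructor
      · rintro (hs | ⟨y, hy, h⟩)
        · exact Or.inl hs
        · exact Or.inr ⟨y, List.mem_cons_of_mem _ hy, h⟩
      · rintro (hs | ⟨y, hy, hcy, rfl⟩)
        · exact Or.inl hs
        · rcases List.mem_cons.mp hy with rfl | hy'
          · simp [hcy] at hc
          · exact Or.inr ⟨y, hy', hcy, rfl⟩

theorem pv_mem_collect (teacher course day : String)
    (timetables : List (String × List (String × Int × List (String × String))))
    (s0 : PySem.Set Int) (x : Int) :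
    (x ∈ pvB_collect teacher course day timetables s0) ↔
    x ∈ s0 ∨ ∃ t ∈ timetables, ∃ y ∈ t.2,
      (y.1 == day && (decide (1 ≤ y.2.1) && decide (y.2.1 ≤ 9)) && pvEntryOk teacher course y.2.2) = true
      ∧ x = y.2.1 := by
  unfold pvB_collect
  induction timetables generalizing s0 with
  | nil => simp
  | cons t ts ih =>
    simp only [List.foldl_cons]
    rw [ih, pv_mem_foldl_add teacher course day]
    constructor
    · rintro ((hs | ⟨y, hy, h⟩) | ⟨u, hu, h⟩)
      · exact Or.inl hs
      · exact Or.inr ⟨t, List.mem_cons_self, y, hy, h⟩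
      · exact Or.inr ⟨u, List.mem_cons_of_mem _ hu, h⟩
    · rintro (hs | ⟨u, hu, y, hy, h⟩)
      · exact Or.inl (Or.inl hs)
      · rcases List.mem_cons.mp hu with rfl | hu'
        · exact Or.inl (Or.inr ⟨y, hy, h⟩)
        · exact Or.inr ⟨u, hu', y, hy, h⟩

-- ===== streak-loop lemmas =====
theorem pv_streak_ge_mx (xs : List Int) (prev mx cur : Int) :
    mx ≤ (pvA_streakLoop prev (mx, cur) xs).1 := by
  induction xs generalizing prev mx cur with
  | nil => simp [pvA_streakLoop]
  | cons x xs ih =>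
    simp only [pvA_streakLoop]
    by_cases h : x = prev + 1
    · rw [if_pos h]
      exact le_trans (le_max_left _ _) (ih x (max mx (cur + 1)) (cur + 1))
    · rw [if_neg h]; exact ih x mx 1

-- a run of k more consecutive elements after prev extends the current streak
theorem pv_streak_extend (xs : List Int) (prev cur mx k : Int)
    (hp : xs.Pairwise (· < ·)) (hall : ∀ x ∈ xs, prev < x)
    (hk : 0 ≤ k) (hrun : ∀ i : Int, 1 ≤ i → i ≤ k → prev + i ∈ xs)
    (hc1 : 1 ≤ cur) (hcm : cur ≤ mx) :
    cur + k ≤ (pvA_streakLoop prev (mx, cur) xs).1 := by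
  induction xs generalizing prev cur mx k with
  | nil =>
    have hk0 : k = 0 := by
      by_contra h
      exact absurd (hrun 1 le_rfl (by omega)) (List.not_mem_nil)
    simp [pvA_streakLoop, hk0]; omega
  | cons x xs ih =>
    by_cases hk1 : 1 ≤ k
    · have hx1 : prev + 1 ∈ x :: xs := hrun 1 le_rfl hk1
      have hx : x = prev + 1 := by
        rcases List.mem_cons.mp hx1 with h | h
        · omega
        · have h1 := (List.pairwise_cons.mp hp).1 _ h
          have h2 := hall x List.mem_cons_self
          omega
      simp only [pvA_streakLoop]
      rw [if_pos hx]
      have := ih x (cur + 1) (max mx (cur + 1)) (k - 1)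
        (List.pairwise_cons.mp hp).2
        (fun y hy => (List.pairwise_cons.mp hp).1 y hy)
        (by omega)
        (by
          intro i hi1 hi2
          have hm := hrun (i + 1) (by omega) (by omega)
          rcases List.mem_cons.mp hm with h | h
          · omega
          · have : x + i = prev + (i + 1) := by omega
            rwa [this])
        (by omega) (le_max_right _ _)
      omega
    · have hk0 : k = 0 := by omega
      subst hk0
      have := pv_streak_ge_mx (x :: xs) prev mx cur
      omega
-- a run of k+1 consecutive elements anywhere ahead forces result ≥ k+1
theorem pv_streak_window (xs : List Int) (prev cur mx s k : Int)
    (hp : xs.Pairwise (· < ·)) (hall : ∀ x ∈ xs, prev < x)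
    (hk : 0 ≤ k) (hrun : ∀ i : Int, 0 ≤ i → i ≤ k → s + i ∈ xs)
    (hc1 : 1 ≤ cur) (hcm : cur ≤ mx) :
    k + 1 ≤ (pvA_streakLoop prev (mx, cur) xs).1 := by
  induction xs generalizing prev cur mx with
  | nil => exact absurd (hrun 0 le_rfl hk) (List.not_mem_nil)
  | cons x xs ih =>
    have hs : s ∈ x :: xs := by simpa using hrun 0 le_rfl hk
    have hptail := (List.pairwise_cons.mp hp).2
    have hhead := (List.pairwise_cons.mp hp).1
    by_cases hsx : s = x
    · -- the run starts at the head: continue with pv_streak_extend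
      subst hsx
      have hrun' : ∀ i : Int, 1 ≤ i → i ≤ k → s + i ∈ xs := by
        intro i hi1 hi2
        rcases List.mem_cons.mp (hrun i (by omega) hi2) with h | h
        · omega
        · exact h
      simp only [pvA_streakLoop]
      by_cases hb : s = prev + 1
      · rw [if_pos hb]
        have := pv_streak_extend xs s (cur + 1) (max mx (cur + 1)) k hptail hhead hk hrun'
          (by omega) (le_max_right _ _)
        omega
      · rw [if_neg hb]
        have := pv_streak_extend xs s 1 mx k hptail hhead hk hrun' le_rfl (by omega)
        omega
    · have hs' : s ∈ xs := by
        rcases List.mem_cons.mp hs with h | h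
        · exact absurd h hsx
        · exact h
      have hxs : x < s := hhead s hs'
      have hrun' : ∀ i : Int, 0 ≤ i → i ≤ k → s + i ∈ xs := by
        intro i hi1 hi2
        rcases List.mem_cons.mp (hrun i hi1 hi2) with h | h
        · omega
        · exact h
      simp only [pvA_streakLoop]
      by_cases hb : x = prev + 1
      · rw [if_pos hb]
        exact ih x (cur + 1) (max mx (cur + 1)) hptail hhead hrun' (by omega) (le_max_right _ _)
      · rw [if_neg hb]
        exact ih x 1 mx hptail hhead hrun' le_rfl (by omega)

-- the final max streak is achieved by some actual run inside L
theorem pv_streak_achieved (xs : List Int) (L : List Int) (prev cur mx : Int)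
    (hsub : ∀ x ∈ xs, x ∈ L) (hc1 : 1 ≤ cur)
    (hrun : ∀ i : Int, 0 ≤ i → i ≤ cur - 1 → prev - (cur - 1) + i ∈ L)
    (hmx : ∃ s : Int, ∀ i : Int, 0 ≤ i → i ≤ mx - 1 → s + i ∈ L) :
    ∃ s : Int, ∀ i : Int, 0 ≤ i → i ≤ (pvA_streakLoop prev (mx, cur) xs).1 - 1 → s + i ∈ L := by
  induction xs generalizing prev cur mx with
  | nil => simpa [pvA_streakLoop] using hmx
  | cons x xs ih =>
    have hxL : x ∈ L := hsub x List.mem_cons_self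
    have hsub' : ∀ y ∈ xs, y ∈ L := fun y hy => hsub y (List.mem_cons_of_mem _ hy)
    simp only [pvA_streakLoop]
    by_cases hb : x = prev + 1
    · rw [if_pos hb]
      have hrun' : ∀ i : Int, 0 ≤ i → i ≤ (cur + 1) - 1 → x - ((cur + 1) - 1) + i ∈ L := by
        intro i hi1 hi2
        by_cases hi : i ≤ cur - 1
        · have : x - ((cur + 1) - 1) + i = prev - (cur - 1) + i := by omega
          rw [this]; exact hrun i hi1 hi
        · have : x - ((cur + 1) - 1) + i = x := by omega
          rw [this]; exact hxL
      refine ih x (cur + 1) (max mx (cur + 1)) hsub' (by omega) hrun' ?_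
      by_cases hm : cur + 1 ≤ mx
      · obtain ⟨s, hs⟩ := hmx
        exact ⟨s, fun i hi1 hi2 => hs i hi1 (by omega)⟩
      · refine ⟨x - ((cur + 1) - 1), fun i hi1 hi2 => hrun' i hi1 (by omega)⟩
    · rw [if_neg hb]
      refine ih x 1 mx hsub' le_rfl ?_ hmx
      intro i hi1 hi2
      have : x - (1 - 1) + i = x := by omega
      rw [this]; exact hxL

-- main characterisation: for a strictly increasing nonempty list, max streak exceeds ℓ
-- iff some window of ℓ+1 consecutive integers starting in L lies inside L
theorem pv_streak_main (h : Int) (t : List Int) (ℓ : Int)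
    (hp : (h :: t).Pairwise (· < ·)) :
    (ℓ < (pvA_streakLoop h (1, 1) t).1) ↔
    ∃ s ∈ h :: t, ∀ i : Int, 0 ≤ i → i < ℓ + 1 → s + i ∈ h :: t := by
  have hptail := (List.pairwise_cons.mp hp).2
  have hhead := (List.pairwise_cons.mp hp).1
  constructor
  · intro hlt
    have hm1 : 1 ≤ (pvA_streakLoop h (1, 1) t).1 := pv_streak_ge_mx t h 1 1
    obtain ⟨s, hs⟩ := pv_streak_achieved t (h :: t) h 1 1
      (fun x hx => List.mem_cons_of_mem _ hx) le_rfl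
      (by intro i hi1 hi2; have : h - (1 - 1) + i = h := by omega
          rw [this]; exact List.mem_cons_self)
      ⟨h, by intro i hi1 hi2; have : h + i = h := by omega
             rw [this]; exact List.mem_cons_self⟩
    refine ⟨s, by simpa using hs 0 le_rfl (by omega), fun i hi1 hi2 => hs i hi1 (by omega)⟩
  · rintro ⟨s, hsL, hwin⟩
    by_cases hl : ℓ < 0
    · have := pv_streak_ge_mx t h 1 1; omega
    · push_neg at hl
      rcases List.mem_cons.mp hsL with rfl | hst
      · have := pv_streak_extend t s 1 1 ℓ hptail hhead hl
          (by intro i hi1 hi2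
              rcases List.mem_cons.mp (hwin i (by omega) (by omega)) with hh | hh
              · omega
              · exact hh)
          le_rfl le_rfl
        omega
      · have hxs : h < s := hhead s hst
        have := pv_streak_window t h 1 1 s ℓ hptail hhead hl
          (by intro i hi1 hi2
              rcases List.mem_cons.mp (hwin i hi1 (by omega)) with hh | hh
              · omega
              · exact hh)
          le_rfl le_rfl
        omega

-- ===== VERDICT (by name: the statement is the Claim_ definition above) =====
theorem teacher_consecutive_assignment_ok_spec : Claim_equal_teacher_consecutive_assignment_ok := by
  intro teacher course day period timetables consecutive_limits _hdom hpre
  unfold Spec_teacher_consecutive_assignment_ok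
  cases hlim : (PySem.Dict.mk consecutive_limits).get? course with
  | none =>
    simp only [teacher_consecutive_assignment_ok, teacher_consecutive_assignment_ok_alt, hlim]
  | some ℓ =>
    simp only [teacher_consecutive_assignment_ok, teacher_consecutive_assignment_ok_alt, hlim,
      PySem.List.foldl_append_if_eq_filter, List.nil_append]
    -- the A-side assigned list
    generalize hasg : (PySem.List.pyRange 1 10 1).filter
      (fun p => pvA_hit teacher course day p timetables) = asg
    have hmem_asg : ∀ x : Int, x ∈ asg ↔
        (1 ≤ x ∧ x < 10) ∧ pvA_hit teacher course day x timetables = true := by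
      intro x
      rw [← hasg, List.mem_filter, PySem.List.mem_pyRange_one]
    have hpair : asg.Pairwise (· < ·) := by
      rw [← hasg]
      exact List.Pairwise.filter _ (PySem.List.pairwise_lt_pyRange_one 1 10)
    have hnd : asg.Nodup := hpair.imp (fun h => ne_of_lt h)
    -- the simulated list after possibly appending period
    have key : ∀ asg2 : List Int, asg2.Nodup → (∀ x : Int, x ∈ asg2 ↔ x ∈ asg ∨ x = period) →
        (decide ((match PySem.List.sorted asg2 (fun x => x) false with
          | [] => (1 : Int)
          | h :: t => (pvA_streakLoop h (1, 1) t).1) ≤ ℓ)) =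
        !((pvB_collect teacher course day timetables
            (PySem.Set.add PySem.Set.empty period)).any (fun s =>
              (PySem.List.pyRange 0 (ℓ + 1) 1).all (fun i =>
                PySem.Set.contains (pvB_collect teacher course day timetables
                  (PySem.Set.add PySem.Set.empty period)) (s + i)))) := by
      intro asg2 hnd2 hmem2
      have hperm : (PySem.List.sorted asg2 (fun x => x) false).Perm asg2 :=
        PySem.List.sorted_perm asg2 (fun x => x) false
      have hndL : (PySem.List.sorted asg2 (fun x => x) false).Nodup := hperm.nodup_iff.mpr hnd2
      have hle : (PySem.List.sorted asg2 (fun x => x) false).Pairwise (· ≤ ·) := by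
        simpa using PySem.List.sorted_pairwise asg2 (fun x => x)
      have hplt : (PySem.List.sorted asg2 (fun x => x) false).Pairwise (· < ·) :=
        (hle.and hndL).imp (fun h => lt_of_le_of_ne h.1 h.2)
      have hperiodL : period ∈ PySem.List.sorted asg2 (fun x => x) false :=
        hperm.mem_iff.mpr ((hmem2 period).mpr (Or.inr rfl))
      have hmemL : ∀ x : Int, x ∈ PySem.List.sorted asg2 (fun x => x) false ↔
          x ∈ asg ∨ x = period := by
        intro x; rw [hperm.mem_iff]; exact hmem2 x
      -- B's set has the same members as the sorted A-side list
      have hmemB : ∀ x : Int, (x ∈ pvB_collect teacher course day timetables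
          (PySem.Set.add PySem.Set.empty period)) ↔
          x ∈ PySem.List.sorted asg2 (fun x => x) false := by
        intro x
        rw [pv_mem_collect, hmemL, hmem_asg]
        have hbase : (x ∈ PySem.Set.add PySem.Set.empty period) ↔ x = period := by
          simp [PySem.Set.empty]
        rw [hbase]
        constructor
        · rintro (rfl | ⟨t, ht, y, hy, hcond, rfl⟩)
          · exact Or.inr rfl
          · simp only [Bool.and_eq_true, beq_iff_eq, decide_eq_true_eq] at hcond
            obtain ⟨⟨hd, h1, h9⟩, hok⟩ := hcond
            exact Or.inl ⟨⟨h1, by omega⟩,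
              (pv_hit_iff teacher course day y.2.1 timetables hpre).mpr ⟨t, ht, y, hy, hd, rfl, hok⟩⟩
        · rintro (⟨⟨h1, h10⟩, hhit⟩ | rfl)
          · obtain ⟨t, ht, y, hy, hd, hp, hok⟩ :=
              (pv_hit_iff teacher course day x timetables hpre).mp hhit
            refine Or.inr ⟨t, ht, y, hy, ?_, hp.symm⟩
            simp only [Bool.and_eq_true, beq_iff_eq, decide_eq_true_eq]
            exact ⟨⟨hd, by omega, by omega⟩, hok⟩
          · exact Or.inl rfl
      -- case on the sorted list (nonempty, since it contains period)
      cases hL : PySem.List.sorted asg2 (fun x => x) false with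
      | nil => rw [hL] at hperiodL; exact absurd hperiodL (List.not_mem_nil)
      | cons h t =>
        rw [hL] at hplt hmemB
        have hiff : ((pvB_collect teacher course day timetables
            (PySem.Set.add PySem.Set.empty period)).any (fun s =>
              (PySem.List.pyRange 0 (ℓ + 1) 1).all (fun i =>
                PySem.Set.contains (pvB_collect teacher course day timetables
                  (PySem.Set.add PySem.Set.empty period)) (s + i))) = true) ↔
            (ℓ < (pvA_streakLoop h (1, 1) t).1) := by
          rw [List.any_eq_true]
          rw [pv_streak_main h t ℓ hplt]
          constructor
          · rintro ⟨s, hs, hall⟩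
            rw [List.all_eq_true] at hall
            refine ⟨s, (hmemB s).mp hs, fun i hi1 hi2 => ?_⟩
            have := hall i (PySem.List.mem_pyRange_one.mpr ⟨hi1, hi2⟩)
            rw [PySem.Set.contains_iff] at this
            exact (hmemB (s + i)).mp this
          · rintro ⟨s, hs, hwin⟩
            refine ⟨s, (hmemB s).mpr hs, ?_⟩
            rw [List.all_eq_true]
            intro i hi
            obtain ⟨hi1, hi2⟩ := PySem.List.mem_pyRange_one.mp hi
            rw [PySem.Set.contains_iff]
            exact (hmemB (s + i)).mpr (hwin i hi1 hi2)
        have hfin : ∀ (b : Bool), (b = true ↔ ℓ < (pvA_streakLoop h (1, 1) t).1) →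
            decide ((pvA_streakLoop h (1, 1) t).1 ≤ ℓ) = !b := by
          intro b hbi
          cases b
          · have hnlt : ¬ ℓ < (pvA_streakLoop h (1, 1) t).1 := fun hl => by
              simpa using hbi.mpr hl
            simp only [Bool.not_false]
            exact decide_eq_true (by omega)
          · have hlt := hbi.mp rfl
            simp only [Bool.not_true]
            exact decide_eq_false (by omega)
        exact hfin _ hiff
    by_cases hc : asg.contains period
    · rw [if_pos hc]
      have hpm : period ∈ asg := by simpa using hc
      exact key asg hnd (fun x => ⟨Or.inl, fun h => by rcases h with h | rfl <;> [exact h; exact hpm]⟩)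
    · rw [if_neg hc]
      have hpm : period ∉ asg := by simpa using hc
      refine key (asg ++ [period]) ?_ ?_
      · refine List.nodup_append.mpr ⟨hnd, List.nodup_singleton _, ?_⟩
        intro a ha b hb
        rw [List.mem_singleton] at hb
        subst hb
        exact fun heq => hpm (heq ▸ ha)
      · intro x; simp [List.mem_append]
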